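-- pv_equiv track=rewrite | github.com/zrythm/zrythm | data/gen-appdata-xml.py | get_list_for_changelog_group
-- ===== SOURCE A (Python) =====
-- def get_list_for_changelog_group(changelog_nfo, title):
--     last_title = ""
--     result = []
--     for line in changelog_nfo.split("\n"):
--         if line.startswith("###"):
--             last_title = line[4:]
--         elif last_title == title and line.strip():
--             result.append(f"<li>{line[2:]}</li>")
--     return result
-- ===== SOURCE B (Python) =====
-- def get_list_for_changelog_group(changelog_nfo, title):
--     lines = changelog_nfo.split("\n")
--     # pass 1: annotate every line with the header governing it
--     owners = []
--     cur = ""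
--     for line in lines:
--         if line.startswith("###"):
--             cur = line[4:]
--         owners.append(cur)
--     # pass 2: select the title's non-blank body lines and format them
--     return ["<li>" + line[2:] + "</li>"
--             for line, own in zip(lines, owners)
--             if not line.startswith("###") and own == title and line.strip()]
-- ===== Notes on version B (the rewrite author's own statement) =====
-- stated objective: alternative
-- what changed: B works in two staged passes - first annotating every line with its governing header, then selecting and formatting the chosen title's non-blank body lines with a zip comprehension - instead of A's single loop that filters with a running last_title state.
import Mathlib
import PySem

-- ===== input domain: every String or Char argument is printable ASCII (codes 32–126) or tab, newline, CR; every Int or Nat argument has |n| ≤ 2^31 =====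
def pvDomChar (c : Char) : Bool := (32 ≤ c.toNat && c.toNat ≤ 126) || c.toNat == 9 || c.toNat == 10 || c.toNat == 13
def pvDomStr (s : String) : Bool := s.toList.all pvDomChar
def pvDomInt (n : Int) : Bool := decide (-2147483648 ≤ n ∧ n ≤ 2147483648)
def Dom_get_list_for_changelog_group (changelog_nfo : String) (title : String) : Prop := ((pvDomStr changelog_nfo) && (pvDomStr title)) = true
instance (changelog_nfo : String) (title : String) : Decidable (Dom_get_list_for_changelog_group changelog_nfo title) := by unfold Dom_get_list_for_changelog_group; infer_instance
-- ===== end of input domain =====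

-- B replaces A's single running-state filter loop by two staged passes (annotate each line
-- with its governing header, then select & format); return values are proved identical on all
-- inputs (neither mutates anything).

-- ===== PORT A =====
-- A's loop body: state = (last_title, result)
def pvStepA (t : List Char) (st : List Char × List String) (line : List Char) :
    List Char × List String :=
  if PySem.Chars.startswith line ['#','#','#'] then (line.drop 4, st.2)
  else if st.1 == t && !(PySem.Chars.strip line).isEmpty then
    (st.1, st.2 ++ [String.mk (['<','l','i','>'] ++ line.drop 2 ++ ['<','/','l','i','>'])])
  else st

def get_list_for_changelog_group (changelog_nfo : String) (title : String) : List String :=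
  (((PySem.Chars.splitOn changelog_nfo.toList ['\n']).foldl
      (pvStepA title.toList) ([], [])).2)

-- ===== PORT B =====
-- pass 1 loop body: state = (cur, owners)
def pvOwnStep (st : List Char × List (List Char)) (line : List Char) :
    List Char × List (List Char) :=
  let cur := if PySem.Chars.startswith line ['#','#','#'] then line.drop 4 else st.1
  (cur, st.2 ++ [cur])

-- pass 2: the comprehension's per-pair selection
def pvSelect (t : List Char) (p : List Char × List Char) : Option String :=
  if !PySem.Chars.startswith p.1 ['#','#','#'] && p.2 == t
      && !(PySem.Chars.strip p.1).isEmpty then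
    some (String.mk (['<','l','i','>'] ++ p.1.drop 2 ++ ['<','/','l','i','>']))
  else none

def get_list_for_changelog_group_alt (changelog_nfo : String) (title : String) : List String :=
  let lines := PySem.Chars.splitOn changelog_nfo.toList ['\n']
  let owners := (lines.foldl pvOwnStep ([], [])).2
  (lines.zip owners).filterMap (pvSelect title.toList)

-- ===== PRECONDITION & SPEC =====
def Spec_get_list_for_changelog_group (changelog_nfo : String) (title : String) (out : List String) : Prop := out = get_list_for_changelog_group_alt changelog_nfo title
instance (changelog_nfo : String) (title : String) (out : List String) : Decidable (Spec_get_list_for_changelog_group changelog_nfo title out) := by unfold Spec_get_list_for_changelog_group; infer_instance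

-- ===== CLAIM (what is proved, stated in full; the proofs are below) =====
def Claim_equal_get_list_for_changelog_group : Prop := ∀ (changelog_nfo : String) (title : String), Dom_get_list_for_changelog_group changelog_nfo title → Spec_get_list_for_changelog_group changelog_nfo title (get_list_for_changelog_group changelog_nfo title)

-- ===== LEMMAS AND PROOFS =====

-- recursive characterisation of the owners pass
def pvOwners : List Char → List (List Char) → List (List Char)
  | _, [] => []
  | cur, l :: ls =>
    let c := if PySem.Chars.startswith l ['#','#','#'] then l.drop 4 else cur
    c :: pvOwners c ls

theorem pvOwnStep_fold (ls : List (List Char)) (cur : List Char) (acc : List (List Char)) :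
    ls.foldl pvOwnStep (cur, acc)
      = ((ls.foldl pvOwnStep (cur, [])).1, acc ++ pvOwners cur ls) := by
  induction ls generalizing cur acc with
  | nil => simp [pvOwners]
  | cons l ls ih =>
    simp only [List.foldl_cons, pvOwnStep, pvOwners]
    rw [ih, ih]
    conv_rhs => rw [ih]
    simp

-- main invariant: A's fold from any accumulator equals the filtered zip with owners
theorem pv_main (t : List Char) (ls : List (List Char)) (cur : List Char) (acc : List String) :
    (ls.foldl (pvStepA t) (cur, acc)).2
      = acc ++ (ls.zip (pvOwners cur ls)).filterMap (pvSelect t) := by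
  induction ls generalizing cur acc with
  | nil => simp
  | cons l ls ih =>
    simp only [List.foldl_cons, pvStepA, pvOwners]
    by_cases h1 : PySem.Chars.startswith l ['#','#','#'] = true
    · have hsel : pvSelect t (l, l.drop 4) = none := by simp [pvSelect, h1]
      simp only [if_pos h1, List.zip_cons_cons, List.filterMap_cons, hsel]
      exact ih _ _
    · by_cases h2 : (cur == t && !(PySem.Chars.strip l).isEmpty) = true
      · rcases Bool.and_eq_true _ _ |>.mp h2 with ⟨he, hn⟩
        have hsel : pvSelect t (l, cur)
            = some (String.mk (['<','l','i','>'] ++ l.drop 2 ++ ['<','/','l','i','>'])) := by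
          simp [pvSelect, h1, he, hn]
        simp only [if_neg h1, if_pos h2, List.zip_cons_cons, List.filterMap_cons, hsel]
        rw [ih]
        simp
      · have hb : (cur == t && !(PySem.Chars.strip l).isEmpty) = false := by
          simpa using h2
        have hsel : pvSelect t (l, cur) = none := by
          simp [pvSelect, h1, hb]
        simp only [if_neg h1, if_neg h2, List.zip_cons_cons, List.filterMap_cons, hsel]
        exact ih _ _

-- ===== VERDICT (by name: the statement is the Claim_ definition above) =====
theorem get_list_for_changelog_group_spec : Claim_equal_get_list_for_changelog_group := by
  intro changelog_nfo title _
  unfold Spec_get_list_for_changelog_group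
  unfold get_list_for_changelog_group get_list_for_changelog_group_alt
  rw [pv_main]
  have h : ∀ ls : List (List Char),
      (ls.foldl pvOwnStep (([] : List Char), ([] : List (List Char)))).2 = pvOwners [] ls := by
    intro ls; rw [pvOwnStep_fold]; simp
  simp [h]
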